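-- pv_equiv track=rewrite | github.com/PulkitSingla2003/miniscope | gui/src/utils.py | find_triggers
-- ===== SOURCE A (Python) =====
-- def find_triggers(data, threshold, rising=True, max_found=3, min_width=3):
--     """
--     Return indices where threshold crossing happens.
--     min_width: Number of consecutive samples that must be valid after crossing.
--     """
--     out = []
--     N = len(data)
--     for i in range(N - min_width):
--         if rising:
--             # Crossing: prev < th <= curr
--             if data[i] < threshold <= data[i + 1]:
--                 # Check if it stays above threshold for min_width samples
--                 valid = True
--                 for k in range(1, min_width + 1):
--                     if i + k >= N or data[i + k] < threshold:
--                         valid = False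
--                         break
--                 if valid:
--                     out.append(i)
--         else:
--             # Crossing: prev > th >= curr
--             if data[i] > threshold >= data[i + 1]:
--                 # Check if it stays below threshold for min_width samples
--                 valid = True
--                 for k in range(1, min_width + 1):
--                     if i + k >= N or data[i + k] > threshold:
--                         valid = False
--                         break
--                 if valid:
--                     out.append(i)
--         if len(out) >= max_found:
--             break
--     return out
-- ===== SOURCE B (Python) =====
-- def find_triggers(data, threshold, rising=True, max_found=3, min_width=3):
--     """
--     Return indices where threshold crossing happens.
--     min_width: Number of consecutive samples that must be valid after crossing.
--     """
--     N = len(data)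
--     # run[j] = number of consecutive samples from j that stay on the trigger side
--     run = [0] * (N + 1)
--     for j in range(N - 1, -1, -1):
--         ok = data[j] >= threshold if rising else data[j] <= threshold
--         run[j] = run[j + 1] + 1 if ok else 0
--     out = []
--     for i in range(N - min_width):
--         crossed = data[i] < threshold if rising else data[i] > threshold
--         if crossed and run[i + 1] >= min_width:
--             out.append(i)
--         if len(out) >= max_found:
--             break
--     return out
-- ===== Notes on version B (the rewrite author's own statement) =====
-- stated objective: alternative
-- what changed: B precomputes a reverse-pass run-length table (consecutive samples on the trigger side) so A's per-index inner width-validation loop becomes a single O(1) table lookup; it trades A's early exit at max_found for one full pass over the data.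
-- outside the precondition, e.g. on find_triggers([-1, -3, 0, 2], 2, True, 1, -1): A returns [2], B returns [0]; on find_triggers([2], 1, False, 3, 0): A raises IndexError, B returns [0]
import Mathlib
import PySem

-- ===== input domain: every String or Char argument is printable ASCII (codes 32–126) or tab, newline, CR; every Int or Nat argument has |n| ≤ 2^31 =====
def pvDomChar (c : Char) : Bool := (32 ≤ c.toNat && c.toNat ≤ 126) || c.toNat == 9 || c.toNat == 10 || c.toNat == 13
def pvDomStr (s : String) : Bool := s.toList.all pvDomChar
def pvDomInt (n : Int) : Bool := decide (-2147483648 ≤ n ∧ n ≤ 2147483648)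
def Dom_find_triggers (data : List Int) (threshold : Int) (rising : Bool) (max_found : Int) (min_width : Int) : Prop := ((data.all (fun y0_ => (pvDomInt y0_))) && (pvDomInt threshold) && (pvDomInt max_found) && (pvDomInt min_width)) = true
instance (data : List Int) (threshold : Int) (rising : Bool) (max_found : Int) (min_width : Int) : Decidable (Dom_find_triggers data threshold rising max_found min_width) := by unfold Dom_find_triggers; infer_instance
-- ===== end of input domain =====

-- B replaces A's per-index inner width-validation loop by a reverse-pass run-length table consulted in O(1) per index (an alternative algorithm; not measured faster, since A breaks out early at max_found).


-- ===== PORT A =====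
-- literal transliteration of A: for each i in range(N - min_width), check the crossing,
-- then an inner loop over k in range(1, min_width+1) with an early-break 'valid' flag,
-- and after each i break once len(out) >= max_found (modelled by the Bool stop flag).
def find_triggers (data : List Int) (threshold : Int) (rising : Bool) (max_found : Int) (min_width : Int) : List Int :=
  let N : Int := (data.length : Int)
  ((PySem.List.pyRange 0 (N - min_width) 1).foldl (fun (st : List Int × Bool) (i : Int) =>
    if st.2 = true then st else
      let out := st.1
      let out :=
        if rising then
          if PySem.List.pyGetD data i 0 < threshold ∧ threshold ≤ PySem.List.pyGetD data (i + 1) 0 then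
            let valid := (PySem.List.pyRange 1 (min_width + 1) 1).foldl (fun (valid : Bool) (k : Int) =>
              if valid = true then
                (if N ≤ i + k ∨ PySem.List.pyGetD data (i + k) 0 < threshold then false else true)
              else valid) true
            if valid = true then out ++ [i] else out
          else out
        else
          if PySem.List.pyGetD data i 0 > threshold ∧ threshold ≥ PySem.List.pyGetD data (i + 1) 0 then
            let valid := (PySem.List.pyRange 1 (min_width + 1) 1).foldl (fun (valid : Bool) (k : Int) =>
              if valid = true then
                (if N ≤ i + k ∨ PySem.List.pyGetD data (i + k) 0 > threshold then false else true)
              else valid) true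
            if valid = true then out ++ [i] else out
          else out
      (out, decide (max_found ≤ (out.length : Int)))) ([], false)).1

-- ===== PORT B =====
-- B's reverse pass: ftRun ok data computes the run-length table run of length N+1 with
-- run[j] = number of consecutive samples from j satisfying ok (run[N] = 0), built right-to-left.
def ftRun (ok : Int → Bool) : List Int → List Int
  | [] => [0]
  | x :: xs =>
    let r := ftRun ok xs
    (if ok x then r.headD 0 + 1 else 0) :: r

def find_triggers_alt (data : List Int) (threshold : Int) (rising : Bool) (max_found : Int) (min_width : Int) : List Int :=
  let N : Int := (data.length : Int)
  let run := ftRun (fun x => if rising then decide (x ≥ threshold) else decide (x ≤ threshold)) data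
  ((PySem.List.pyRange 0 (N - min_width) 1).foldl (fun (st : List Int × Bool) (i : Int) =>
    if st.2 = true then st else
      let crossed := if rising then decide (PySem.List.pyGetD data i 0 < threshold)
                     else decide (PySem.List.pyGetD data i 0 > threshold)
      let out := if crossed && decide (min_width ≤ PySem.List.pyGetD run (i + 1) 0) then st.1 ++ [i] else st.1
      (out, decide (max_found ≤ (out.length : Int)))) ([], false)).1

-- ===== PRECONDITION & SPEC =====
-- Pre_ excludes min_width ≤ 0, outside the function's stated domain (min_width is the number of
-- consecutive samples that must stay valid): there A's loops index past the end of data and raise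
-- IndexError on most inputs, and any value A does return is an accident of chained-comparison
-- short-circuiting and of where the max_found break happens.
def Pre_find_triggers (data : List Int) (threshold : Int) (rising : Bool) (max_found : Int) (min_width : Int) : Prop := 1 ≤ min_width
instance (data : List Int) (threshold : Int) (rising : Bool) (max_found : Int) (min_width : Int) : Decidable (Pre_find_triggers data threshold rising max_found min_width) := by unfold Pre_find_triggers; infer_instance
def pvWitness_find_triggers : List Int × Int × Bool × Int × Int := ([0, 5, 6, 6, 1], 3, true, 3, 2)

def Spec_find_triggers (data : List Int) (threshold : Int) (rising : Bool) (max_found : Int) (min_width : Int) (out : List Int) : Prop := out = find_triggers_alt data threshold rising max_found min_width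
instance (data : List Int) (threshold : Int) (rising : Bool) (max_found : Int) (min_width : Int) (out : List Int) : Decidable (Spec_find_triggers data threshold rising max_found min_width out) := by unfold Spec_find_triggers; infer_instance

-- ===== CLAIM (what is proved, stated in full; the proofs are below) =====
def Claim_equal_find_triggers : Prop := ∀ (data : List Int) (threshold : Int) (rising : Bool) (max_found : Int) (min_width : Int), Dom_find_triggers data threshold rising max_found min_width → Pre_find_triggers data threshold rising max_found min_width → Spec_find_triggers data threshold rising max_found min_width (find_triggers data threshold rising max_found min_width)

-- ===== LEMMAS AND PROOFS =====

theorem ftRun_getD (ok : Int → Bool) (l : List Int) (j : Nat) :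
    (ftRun ok l).getD j 0 = (((l.drop j).takeWhile ok).length : Int) := by
  induction l generalizing j with
  | nil =>
    cases j <;> simp [ftRun]
  | cons x xs ih =>
    cases j with
    | zero =>
      have h0 := ih 0
      simp only [ftRun, List.drop_zero, List.takeWhile] at *
      simp [List.getD] at h0
      cases hok : ok x <;> simp [List.getD, List.head?_eq_getElem?, h0]
    | succ j =>
      simpa [ftRun] using ih j

theorem takeWhile_len_ge (ok : Int → Bool) (l : List Int) (m : Nat) (hm : m ≤ l.length) :
    (m ≤ (l.takeWhile ok).length) ↔ ∀ k < m, ok (l.getD k 0) = true := by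
  induction l generalizing m with
  | nil =>
    have : m = 0 := by simpa using hm
    subst this; simp
  | cons x xs ih =>
    cases m with
    | zero => simp
    | succ m =>
      cases hok : ok x with
      | false =>
        simp only [List.takeWhile, hok]
        constructor
        · intro h; simp at h
        · intro h
          have := h 0 (by omega)
          simp [List.getD] at this
          rw [this] at hok; cases hok
      | true =>
        simp only [List.takeWhile, hok, List.length_cons]
        have hml : m ≤ xs.length := by simpa using hm
        rw [Nat.succ_le_succ_iff, ih m hml]
        constructor
        · intro h k hk
          cases k with
          | zero => simpa [List.getD] using hok
          | succ k => simpa [List.getD] using h k (by omega)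
        · intro h k hk
          simpa [List.getD] using h (k + 1) (by omega)

theorem getD_drop (l : List Int) (j k : Nat) : (l.drop j).getD k 0 = l.getD (j + k) 0 := by
  simp [List.getD, List.getElem?_drop]

theorem foldl_flag_false (q : Int → Prop) [DecidablePred q] (l : List Int) :
    l.foldl (fun (v : Bool) (k : Int) => if v = true then (if q k then false else true) else v) false = false := by
  induction l with
  | nil => rfl
  | cons x xs ih => simpa using ih

theorem foldl_flag (q : Int → Prop) [DecidablePred q] (l : List Int) :
    l.foldl (fun (v : Bool) (k : Int) => if v = true then (if q k then false else true) else v) true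
      = l.all (fun k => !decide (q k)) := by
  induction l with
  | nil => rfl
  | cons x xs ih =>
    by_cases hq : q x
    · simp only [List.foldl_cons, List.all_cons, hq, decide_true,
        Bool.not_true, Bool.false_and]
      exact foldl_flag_false q xs
    · simp only [List.foldl_cons, List.all_cons, hq, decide_false,
        Bool.not_false, Bool.true_and]
      exact ih

-- pyGetD at a nonnegative index is List.getD at the corresponding Nat index
theorem pyGetD_toNat (l : List Int) (j : Int) (hj : 0 ≤ j) :
    PySem.List.pyGetD l j 0 = l.getD j.toNat 0 := by
  have h : j = ((j.toNat : Nat) : Int) := by omega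
  rw [h, PySem.List.pyGetD_natCast, Int.toNat_natCast]

-- run[i+1] ≥ mw  ↔  the next mw samples after i all satisfy ok
theorem ftRun_key (data : List Int) (ok : Int → Bool) (mw i : Int)
    (hmw : 1 ≤ mw) (hi : 0 ≤ i) (hiN : i + mw < (data.length : Int)) :
    (mw ≤ PySem.List.pyGetD (ftRun ok data) (i + 1) 0) ↔
      (∀ k : Int, 1 ≤ k → k ≤ mw → ok (PySem.List.pyGetD data (i + k) 0) = true) := by
  rw [pyGetD_toNat _ _ (by omega), ftRun_getD]
  have hlen : (data.drop (i + 1).toNat).length = data.length - (i + 1).toNat := by simp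
  have hmle : mw.toNat ≤ (data.drop (i + 1).toNat).length := by omega
  have hcast : (mw ≤ ((((data.drop (i + 1).toNat).takeWhile ok).length : Nat) : Int)) ↔
      mw.toNat ≤ ((data.drop (i + 1).toNat).takeWhile ok).length := by omega
  rw [hcast, takeWhile_len_ge ok _ _ hmle]
  constructor
  · intro h k hk1 hkm
    have := h (k - 1).toNat (by omega)
    rw [getD_drop] at this
    rw [pyGetD_toNat _ _ (by omega)]
    have heq : (i + 1).toNat + (k - 1).toNat = (i + k).toNat := by omega
    rwa [heq] at this
  · intro h k hk
    rw [getD_drop]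
    have := h ((k : Int) + 1) (by omega) (by omega)
    rw [pyGetD_toNat _ _ (by omega)] at this
    have heq : (i + ((k : Int) + 1)).toNat = (i + 1).toNat + k := by omega
    rwa [heq] at this

-- A's inner validation fold (rising case) equals the run-table test, under the outer-loop bounds
theorem validA_rising (data : List Int) (threshold mw i : Int)
    (hmw : 1 ≤ mw) (hi : 0 ≤ i) (hiN : i < (data.length : Int) - mw) :
    ((PySem.List.pyRange 1 (mw + 1) 1).foldl (fun (v : Bool) (k : Int) =>
        if v = true then (if (data.length : Int) ≤ i + k ∨ PySem.List.pyGetD data (i + k) 0 < threshold then false else true) else v) true)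
      = decide (mw ≤ PySem.List.pyGetD (ftRun (fun x => decide (threshold ≤ x)) data) (i + 1) 0) := by
  rw [Bool.eq_iff_iff, decide_eq_true_eq, foldl_flag, List.all_eq_true,
    ftRun_key data _ mw i hmw hi (by omega)]
  constructor
  · intro h k hk1 hkm
    have := h k (by rw [PySem.List.mem_pyRange_one]; omega)
    have hnb : ¬ ((data.length : Int) ≤ i + k) := by omega
    simp [hnb, ← decide_not, not_lt] at this
    simpa using this
  · intro h k hk
    rw [PySem.List.mem_pyRange_one] at hk
    have := h k (by omega) (by omega)
    have hnb : ¬ ((data.length : Int) ≤ i + k) := by omega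
    simp [hnb, ← decide_not, not_lt]
    simpa using this

-- the falling case, symmetric
theorem validA_falling (data : List Int) (threshold mw i : Int)
    (hmw : 1 ≤ mw) (hi : 0 ≤ i) (hiN : i < (data.length : Int) - mw) :
    ((PySem.List.pyRange 1 (mw + 1) 1).foldl (fun (v : Bool) (k : Int) =>
        if v = true then (if (data.length : Int) ≤ i + k ∨ PySem.List.pyGetD data (i + k) 0 > threshold then false else true) else v) true)
      = decide (mw ≤ PySem.List.pyGetD (ftRun (fun x => decide (x ≤ threshold)) data) (i + 1) 0) := by
  rw [Bool.eq_iff_iff, decide_eq_true_eq, foldl_flag, List.all_eq_true,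
    ftRun_key data _ mw i hmw hi (by omega)]
  constructor
  · intro h k hk1 hkm
    have := h k (by rw [PySem.List.mem_pyRange_one]; omega)
    have hnb : ¬ ((data.length : Int) ≤ i + k) := by omega
    simp [hnb, ← decide_not, not_lt] at this
    simpa using this
  · intro h k hk
    rw [PySem.List.mem_pyRange_one] at hk
    have := h k (by omega) (by omega)
    have hnb : ¬ ((data.length : Int) ≤ i + k) := by omega
    simp [hnb, ← decide_not, not_lt]
    simpa using this

-- ===== VERDICT (by name: the statement is the Claim_ definition above) =====
theorem find_triggers_spec : Claim_equal_find_triggers := by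
  intro data threshold rising max_found min_width _ hpre
  unfold Spec_find_triggers find_triggers find_triggers_alt
  simp only []
  congr 1
  apply PySem.List.foldl_congr_mem
  intro st i hi
  rw [PySem.List.mem_pyRange_one] at hi
  obtain ⟨hi0, hiN⟩ := hi
  by_cases hstop : st.2 = true
  · simp [hstop]
  · simp only [hstop]
    have hpre' : (1 : Int) ≤ min_width := hpre
    cases rising with
    | true =>
      rw [validA_rising data threshold min_width i hpre' hi0 hiN]
      by_cases hc : PySem.List.pyGetD data i 0 < threshold
      · by_cases hr : min_width ≤ PySem.List.pyGetD
            (ftRun (fun x => decide (threshold ≤ x)) data) (i + 1) 0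
        · have hx : threshold ≤ PySem.List.pyGetD data (i + 1) 0 := by
            have := (ftRun_key data _ min_width i hpre' hi0 (by omega)).mp hr 1 le_rfl hpre'
            simpa using this
          simp [hc, hx, hr, ge_iff_le]
        · by_cases hx : threshold ≤ PySem.List.pyGetD data (i + 1) 0 <;>
            simp [hc, hx, hr, ge_iff_le]
      · simp [hc, ge_iff_le]
    | false =>
      rw [validA_falling data threshold min_width i hpre' hi0 hiN]
      by_cases hc : PySem.List.pyGetD data i 0 > threshold
      · by_cases hr : min_width ≤ PySem.List.pyGetD
            (ftRun (fun x => decide (x ≤ threshold)) data) (i + 1) 0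
        · have hx : PySem.List.pyGetD data (i + 1) 0 ≤ threshold := by
            have := (ftRun_key data _ min_width i hpre' hi0 (by omega)).mp hr 1 le_rfl hpre'
            simpa using this
          simp [hc, hx, hr, ge_iff_le]
        · by_cases hx : PySem.List.pyGetD data (i + 1) 0 ≤ threshold <;>
            simp [hc, hx, hr, ge_iff_le]
      · simp [hc, ge_iff_le]
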